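-- pv_equiv track=rewrite | github.com/GarvitSinghal1/GameConsole.Python | games/yahtzee/yahtzee.py | calculate_possible_scores
-- ===== SOURCE A (Python) =====
-- def calculate_possible_scores(dice):
--     """Calculate all possible scores for the current dice."""
--     dice_counts = [0] * 7  # Index 0 will be unused
--     for die in dice:
--         dice_counts[die] += 1
--
--     scores = {}
--
--     # Upper section
--     scores["ones"] = sum(die for die in dice if die == 1)
--     scores["twos"] = sum(die for die in dice if die == 2)
--     scores["threes"] = sum(die for die in dice if die == 3)
--     scores["fours"] = sum(die for die in dice if die == 4)
--     scores["fives"] = sum(die for die in dice if die == 5)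
--     scores["sixes"] = sum(die for die in dice if die == 6)
--
--     # Lower section
--     # Three of a kind
--     if any(count >= 3 for count in dice_counts):
--         scores["three_of_a_kind"] = sum(dice)
--     else:
--         scores["three_of_a_kind"] = 0
--
--     # Four of a kind
--     if any(count >= 4 for count in dice_counts):
--         scores["four_of_a_kind"] = sum(dice)
--     else:
--         scores["four_of_a_kind"] = 0
--
--     # Full house
--     if (3 in dice_counts and 2 in dice_counts) or dice_counts.count(3) > 1:
--         scores["full_house"] = 25
--     else:
--         scores["full_house"] = 0
--
--     # Small straight
--     if (1 in dice and 2 in dice and 3 in dice and 4 in dice) or \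
--        (2 in dice and 3 in dice and 4 in dice and 5 in dice) or \
--        (3 in dice and 4 in dice and 5 in dice and 6 in dice):
--         scores["small_straight"] = 30
--     else:
--         scores["small_straight"] = 0
--
--     # Large straight
--     if (1 in dice and 2 in dice and 3 in dice and 4 in dice and 5 in dice) or \
--        (2 in dice and 3 in dice and 4 in dice and 5 in dice and 6 in dice):
--         scores["large_straight"] = 40
--     else:
--         scores["large_straight"] = 0
--
--     # Yahtzee
--     if 5 in dice_counts:
--         scores["yahtzee"] = 50
--     else:
--         scores["yahtzee"] = 0
--
--     # Chance
--     scores["chance"] = sum(dice)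
--
--     return scores
-- ===== SOURCE B (Python) =====
-- def calculate_possible_scores(dice):
--     """Calculate all possible scores for the current dice."""
--     counts = [0] * 7  # Index 0 unused; the natural Python dice-count table
--     for die in dice:
--         counts[die] += 1
--
--     # One fused pass over the dice: grand total, per-face upper sums, face presence.
--     total = 0
--     upper = [0] * 7
--     present = [False] * 7
--     for die in dice:
--         total += die
--         if 1 <= die <= 6:
--             upper[die] += die
--             present[die] = True
--
--     # One scan over the count table: summary statistics for the lower section.
--     best = 0
--     triples = 0
--     has2 = has3 = has5 = False
--     for c in counts:
--         if c > best:
--             best = c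
--         if c == 2:
--             has2 = True
--         elif c == 3:
--             has3 = True
--             triples += 1
--         elif c == 5:
--             has5 = True
--
--     # Longest run of consecutive present faces decides both straights.
--     run = best_run = 0
--     for f in range(1, 7):
--         run = run + 1 if present[f] else 0
--         if run > best_run:
--             best_run = run
--
--     return {
--         "ones": upper[1],
--         "twos": upper[2],
--         "threes": upper[3],
--         "fours": upper[4],
--         "fives": upper[5],
--         "sixes": upper[6],
--         "three_of_a_kind": total if best >= 3 else 0,
--         "four_of_a_kind": total if best >= 4 else 0,
--         "full_house": 25 if (has3 and has2) or triples > 1 else 0,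
--         "small_straight": 30 if best_run >= 4 else 0,
--         "large_straight": 40 if best_run >= 5 else 0,
--         "yahtzee": 50 if has5 else 0,
--         "chance": total,
--     }
-- ===== Notes on version B (the rewrite author's own statement) =====
-- stated objective: alternative
-- what changed: Instead of A's per-category rescans (six filtered generator sums, repeated any/in/count scans, enumerated straight windows), B makes one fused pass over the dice (total, per-face upper sums, face presence), one scan over the count table collecting summary statistics (max count, exact-count flags, number of triples), and a longest-consecutive-run scan over the faces that decides both straights, then assembles every category from those accumulators.
import Mathlib
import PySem

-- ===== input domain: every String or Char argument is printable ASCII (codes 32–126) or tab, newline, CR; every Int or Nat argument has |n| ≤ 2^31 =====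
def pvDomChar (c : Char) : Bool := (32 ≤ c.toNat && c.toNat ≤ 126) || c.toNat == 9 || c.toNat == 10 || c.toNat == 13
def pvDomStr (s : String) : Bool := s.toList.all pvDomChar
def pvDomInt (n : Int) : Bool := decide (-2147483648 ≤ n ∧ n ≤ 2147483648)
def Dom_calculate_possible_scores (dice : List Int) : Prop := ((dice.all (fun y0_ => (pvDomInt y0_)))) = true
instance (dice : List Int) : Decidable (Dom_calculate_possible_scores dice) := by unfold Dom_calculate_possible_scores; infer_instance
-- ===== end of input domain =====

-- B replaces A's per-category rescans with one fused pass over the dice, a summary-statistics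
-- scan of the count table, and a longest-run scan for the straights (alternative structure).


-- ===== PORT A =====
-- dice_counts[die] += 1 with Python's negative-index wraparound; none = IndexError
def pvCountsA (dice : List Int) : Option (List Int) :=
  dice.foldl
    (fun acc die => acc.bind (fun cs =>
      (PySem.List.pyGet? cs die).bind (fun v => PySem.List.pySet? cs die (v + 1))))
    (some [0, 0, 0, 0, 0, 0, 0])

def calculate_possible_scores (dice : List Int) : List (String × Int) :=
  match pvCountsA dice with
  | none => []   -- IndexError: excluded by Pre_
  | some dice_counts =>
    [("ones",   (dice.filter (fun die => die == 1)).sum),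
     ("twos",   (dice.filter (fun die => die == 2)).sum),
     ("threes", (dice.filter (fun die => die == 3)).sum),
     ("fours",  (dice.filter (fun die => die == 4)).sum),
     ("fives",  (dice.filter (fun die => die == 5)).sum),
     ("sixes",  (dice.filter (fun die => die == 6)).sum),
     ("three_of_a_kind", if dice_counts.any (fun c => 3 ≤ c) then dice.sum else 0),
     ("four_of_a_kind",  if dice_counts.any (fun c => 4 ≤ c) then dice.sum else 0),
     ("full_house", if (dice_counts.contains 3 && dice_counts.contains 2)
                       || decide (1 < dice_counts.count 3) then 25 else 0),
     ("small_straight",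
        if (dice.contains 1 && dice.contains 2 && dice.contains 3 && dice.contains 4)
           || (dice.contains 2 && dice.contains 3 && dice.contains 4 && dice.contains 5)
           || (dice.contains 3 && dice.contains 4 && dice.contains 5 && dice.contains 6)
        then 30 else 0),
     ("large_straight",
        if (dice.contains 1 && dice.contains 2 && dice.contains 3 && dice.contains 4 && dice.contains 5)
           || (dice.contains 2 && dice.contains 3 && dice.contains 4 && dice.contains 5 && dice.contains 6)
        then 40 else 0),
     ("yahtzee", if dice_counts.contains 5 then 50 else 0),
     ("chance", dice.sum)]

-- ===== PORT B =====
-- identical counting loop (the natural Python dice-count table; kept from Source B)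
def pvCountsB (dice : List Int) : Option (List Int) :=
  dice.foldl
    (fun acc die => acc.bind (fun cs =>
      (PySem.List.pyGet? cs die).bind (fun v => PySem.List.pySet? cs die (v + 1))))
    (some [0, 0, 0, 0, 0, 0, 0])

-- pass 2 of Source B: total, per-face upper sums, face presence, in one fold over the dice
def pvStep2 (s : Int × List Int × List Bool) (die : Int) : Int × List Int × List Bool :=
  let (t, u, p) := s
  if 1 ≤ die ∧ die ≤ 6 then
    (t + die, u.set die.toNat ((u.getD die.toNat 0) + die), p.set die.toNat true)
  else (t + die, u, p)

def pvPass2 (dice : List Int) (s : Int × List Int × List Bool) : Int × List Int × List Bool :=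
  dice.foldl pvStep2 s

-- pass 3 of Source B: (best, triples, has2, has3, has5) scanned off the count table
def pvStep3 (s : Int × Int × Bool × Bool × Bool) (c : Int) : Int × Int × Bool × Bool × Bool :=
  let (b, tr, h2, h3, h5) := s
  (if b < c then c else b,
   if c == 2 then tr else if c == 3 then tr + 1 else tr,
   if c == 2 then true else h2,
   if c == 2 then h3 else if c == 3 then true else h3,
   if c == 2 then h5 else if c == 3 then h5 else if c == 5 then true else h5)

def pvStats (counts : List Int) : Int × Int × Bool × Bool × Bool :=
  counts.foldl pvStep3 (0, 0, false, false, false)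

-- pass 4 of Source B: longest run of consecutive present faces over f = 1..6
def pvBestRun (present : List Bool) : Int :=
  ((PySem.List.pyRange 1 7 1).foldl
    (fun s f =>
      let (run, br) := s
      let run' : Int := if present.getD f.toNat false then run + 1 else 0
      (run', if br < run' then run' else br))
    ((0 : Int), (0 : Int))).2

def calculate_possible_scores_alt (dice : List Int) : List (String × Int) :=
  match pvCountsB dice with
  | none => []   -- IndexError: excluded by Pre_
  | some counts =>
    let (total, upper, present) :=
      pvPass2 dice (0, List.replicate 7 0, List.replicate 7 false)
    let (best, triples, has2, has3, has5) := pvStats counts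
    let best_run := pvBestRun present
    [("ones",   upper.getD 1 0),
     ("twos",   upper.getD 2 0),
     ("threes", upper.getD 3 0),
     ("fours",  upper.getD 4 0),
     ("fives",  upper.getD 5 0),
     ("sixes",  upper.getD 6 0),
     ("three_of_a_kind", if 3 ≤ best then total else 0),
     ("four_of_a_kind",  if 4 ≤ best then total else 0),
     ("full_house", if (has3 && has2) || decide (1 < triples) then 25 else 0),
     ("small_straight", if 4 ≤ best_run then 30 else 0),
     ("large_straight", if 5 ≤ best_run then 40 else 0),
     ("yahtzee", if has5 then 50 else 0),
     ("chance", total)]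

-- ===== PRECONDITION & SPEC =====
-- exactly the dice on which A's counting loop raises no IndexError (7-slot list, negative wrap)
def Pre_calculate_possible_scores (dice : List Int) : Prop :=
  ∀ d ∈ dice, -7 ≤ d ∧ d ≤ 6
instance (dice : List Int) : Decidable (Pre_calculate_possible_scores dice) := by
  unfold Pre_calculate_possible_scores; infer_instance
def pvWitness_calculate_possible_scores : List Int := [1, 2, 3, 4, 5]

def Spec_calculate_possible_scores (dice : List Int) (out : List (String × Int)) : Prop := out = calculate_possible_scores_alt dice
instance (dice : List Int) (out : List (String × Int)) : Decidable (Spec_calculate_possible_scores dice out) := by unfold Spec_calculate_possible_scores; infer_instance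

-- ===== CLAIM (what is proved, stated in full; the proofs are below) =====
def Claim_equal_calculate_possible_scores : Prop := ∀ (dice : List Int), Dom_calculate_possible_scores dice → Pre_calculate_possible_scores dice → Spec_calculate_possible_scores dice (calculate_possible_scores dice)

-- ===== LEMMAS AND PROOFS =====

theorem pv_len_pySet? (xs : List Int) (i v : Int) (ys : List Int)
    (h : PySem.List.pySet? xs i v = some ys) : ys.length = xs.length := by
  unfold PySem.List.pySet? at h
  cases hk : PySem.List.pyIdx? xs.length i with
  | none => simp_all
  | some k =>
    simp only [hk, Option.map_some, Option.some.injEq] at h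
    subst h; exact List.length_set ..

theorem pv_foldl_none {α β : Type} (f : Option α → β → Option α)
    (hf : ∀ b, f none b = none) (l : List β) : l.foldl f none = none := by
  induction l <;> simp_all

theorem pv_counts_length (dice : List Int) : ∀ (init cs : List Int),
    dice.foldl
      (fun acc die => acc.bind (fun cs =>
        (PySem.List.pyGet? cs die).bind (fun v => PySem.List.pySet? cs die (v + 1))))
      (some init) = some cs → cs.length = init.length := by
  induction dice with
  | nil => intro init cs h; simp at h; simp [← h]
  | cons d t ih =>
    intro init cs h
    simp only [List.foldl_cons, Option.bind_some] at h
    cases hg : PySem.List.pyGet? init d with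
    | none =>
      rw [hg] at h; simp only [Option.bind_none] at h
      rw [pv_foldl_none _ (fun _ => rfl) t] at h; exact absurd h (by simp)
    | some v =>
      rw [hg] at h; simp only [Option.bind_some] at h
      cases hs : PySem.List.pySet? init d (v + 1) with
      | none =>
        rw [hs] at h
        rw [pv_foldl_none _ (fun _ => rfl) t] at h; exact absurd h (by simp)
      | some init' =>
        rw [hs] at h
        rw [ih init' cs h]
        exact pv_len_pySet? init d (v + 1) init' hs

-- the fused pass: total, per-face upper sums, face presence, in one invariant
theorem pv_pass2_spec (dice : List Int) :
    ∀ (t u0 u1 u2 u3 u4 u5 u6 : Int) (p0 p1 p2 p3 p4 p5 p6 : Bool),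
    pvPass2 dice (t, [u0, u1, u2, u3, u4, u5, u6], [p0, p1, p2, p3, p4, p5, p6]) =
      (t + dice.sum,
       [u0,
        u1 + (dice.filter (fun d => d == 1)).sum,
        u2 + (dice.filter (fun d => d == 2)).sum,
        u3 + (dice.filter (fun d => d == 3)).sum,
        u4 + (dice.filter (fun d => d == 4)).sum,
        u5 + (dice.filter (fun d => d == 5)).sum,
        u6 + (dice.filter (fun d => d == 6)).sum],
       [p0,
        p1 || dice.contains 1, p2 || dice.contains 2, p3 || dice.contains 3,
        p4 || dice.contains 4, p5 || dice.contains 5, p6 || dice.contains 6]) := by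
  induction dice with
  | nil => intros; simp [pvPass2]
  | cons d rest ih =>
    intro t u0 u1 u2 u3 u4 u5 u6 p0 p1 p2 p3 p4 p5 p6
    have hstep : pvPass2 (d :: rest) (t, [u0,u1,u2,u3,u4,u5,u6], [p0,p1,p2,p3,p4,p5,p6])
        = pvPass2 rest (pvStep2 (t, [u0,u1,u2,u3,u4,u5,u6], [p0,p1,p2,p3,p4,p5,p6]) d) := rfl
    rw [hstep]
    by_cases hd : 1 ≤ d ∧ d ≤ 6
    · obtain ⟨hd1, hd2⟩ := hd
      interval_cases d <;>
        (simp only [pvStep2, Int.reduceToNat, Int.toNat_one, List.set_cons_succ,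
           List.set_cons_zero, List.getD_cons_succ, List.getD_cons_zero];
         norm_num;
         rw [ih];
         simp;
         constructor <;> omega)
    · have h1 : d ≠ 1 := by omega
      have h2 : d ≠ 2 := by omega
      have h3 : d ≠ 3 := by omega
      have h4 : d ≠ 4 := by omega
      have h5 : d ≠ 5 := by omega
      have h6 : d ≠ 6 := by omega
      simp only [pvStep2, if_neg hd]
      rw [ih]
      simp [h1, h2, h3, h4, h5, h6,
        Ne.symm h1, Ne.symm h2, Ne.symm h3, Ne.symm h4, Ne.symm h5, Ne.symm h6, add_assoc]

-- the stats fold acts componentwise: running max, count of exact threes, exact-count flags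
theorem pv_stats_proj (cs : List Int) :
    ∀ (b tr : Int) (h2 h3 h5 : Bool),
    cs.foldl pvStep3 (b, tr, h2, h3, h5) =
      (cs.foldl (fun b c => if b < c then c else b) b,
       tr + (cs.count 3 : Int),
       h2 || cs.contains 2,
       h3 || cs.contains 3,
       h5 || cs.contains 5) := by
  induction cs with
  | nil => intros; simp
  | cons c rest ih =>
    intro b tr h2 h3 h5
    simp only [List.foldl_cons, pvStep3, List.count_cons, List.contains_cons]
    rw [ih]
    refine Prod.ext rfl (Prod.ext ?_ (Prod.ext ?_ (Prod.ext ?_ ?_))) <;>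
      by_cases hc2 : c = 2 <;> by_cases hc3 : c = 3 <;> by_cases hc5 : c = 5 <;>
      simp_all [Ne.symm] <;> (try omega) <;>
      simp [show ((2:Int) == c) = false from by simp; omega,
            show ((3:Int) == c) = false from by simp; omega,
            show ((5:Int) == c) = false from by simp; omega]

-- k ≤ running max ⟺ the seed or some element reaches k
theorem pv_max_any (cs : List Int) : ∀ (k b : Int),
    (k ≤ cs.foldl (fun b c => if b < c then c else b) b)
      ↔ (k ≤ b ∨ (cs.any fun c => decide (k ≤ c)) = true) := by
  induction cs with
  | nil => intros; simp
  | cons c rest ih =>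
    intro k b
    simp only [List.foldl_cons, List.any_cons, Bool.or_eq_true, decide_eq_true_eq]
    constructor
    · intro h
      rcases (ih k _).1 h with h' | h'
      · by_cases hbc : b < c
        · rw [if_pos hbc] at h'; exact Or.inr (Or.inl h')
        · rw [if_neg hbc] at h'; exact Or.inl h'
      · exact Or.inr (Or.inr h')
    · intro h
      apply (ih k _).2
      rcases h with h | h | h
      · exact Or.inl (by split <;> omega)
      · exact Or.inl (by split <;> omega)
      · exact Or.inr h

-- the run scan over faces 1..6 decides exactly the straight windows
theorem pv_run_small (q1 q2 q3 q4 q5 q6 : Bool) :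
    decide (4 ≤ pvBestRun [false, q1, q2, q3, q4, q5, q6])
      = ((q1 && q2 && q3 && q4) || (q2 && q3 && q4 && q5) || (q3 && q4 && q5 && q6)) := by
  revert q1 q2 q3 q4 q5 q6; decide

theorem pv_run_large (q1 q2 q3 q4 q5 q6 : Bool) :
    decide (5 ≤ pvBestRun [false, q1, q2, q3, q4, q5, q6])
      = ((q1 && q2 && q3 && q4 && q5) || (q2 && q3 && q4 && q5 && q6)) := by
  revert q1 q2 q3 q4 q5 q6; decide

-- ===== VERDICT (by name: the statement is the Claim_ definition above) =====
theorem calculate_possible_scores_spec : Claim_equal_calculate_possible_scores := by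
  intro dice _ _
  unfold Spec_calculate_possible_scores
  unfold calculate_possible_scores calculate_possible_scores_alt
  have hBA : pvCountsB dice = pvCountsA dice := rfl
  rw [hBA]
  cases hc : pvCountsA dice with
  | none => rfl
  | some cs =>
    have hlen : cs.length = 7 := pv_counts_length dice [0,0,0,0,0,0,0] cs hc
    obtain ⟨c0, c1, c2, c3, c4, c5, c6, rfl⟩ :
        ∃ c0 c1 c2 c3 c4 c5 c6, cs = [c0, c1, c2, c3, c4, c5, c6] := by
      match cs, hlen with
      | [c0, c1, c2, c3, c4, c5, c6], _ => exact ⟨c0, c1, c2, c3, c4, c5, c6, rfl⟩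
    have hp2 : pvPass2 dice ((0 : Int), List.replicate 7 (0 : Int), List.replicate 7 false) =
        (dice.sum,
         [0,
          (dice.filter (fun d => d == 1)).sum,
          (dice.filter (fun d => d == 2)).sum,
          (dice.filter (fun d => d == 3)).sum,
          (dice.filter (fun d => d == 4)).sum,
          (dice.filter (fun d => d == 5)).sum,
          (dice.filter (fun d => d == 6)).sum],
         [false,
          dice.contains 1, dice.contains 2, dice.contains 3,
          dice.contains 4, dice.contains 5, dice.contains 6]) := by
      have h := pv_pass2_spec dice 0 0 0 0 0 0 0 0 false false false false false false false
      simpa [List.replicate] using h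
    have hstats := pv_stats_proj [c0, c1, c2, c3, c4, c5, c6] 0 0 false false false
    have e3 : (3 ≤ [c0, c1, c2, c3, c4, c5, c6].foldl (fun b c => if b < c then c else b) 0)
        ↔ (([c0, c1, c2, c3, c4, c5, c6].any fun c => decide (3 ≤ c)) = true) :=
      (pv_max_any _ 3 0).trans (or_iff_right (by omega))
    have e4 : (4 ≤ [c0, c1, c2, c3, c4, c5, c6].foldl (fun b c => if b < c then c else b) 0)
        ↔ (([c0, c1, c2, c3, c4, c5, c6].any fun c => decide (4 ≤ c)) = true) :=
      (pv_max_any _ 4 0).trans (or_iff_right (by omega))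
    have es : (4 ≤ pvBestRun [false, dice.contains 1, dice.contains 2, dice.contains 3,
          dice.contains 4, dice.contains 5, dice.contains 6])
        ↔ ((dice.contains 1 && dice.contains 2 && dice.contains 3 && dice.contains 4)
           || (dice.contains 2 && dice.contains 3 && dice.contains 4 && dice.contains 5)
           || (dice.contains 3 && dice.contains 4 && dice.contains 5 && dice.contains 6)) = true := by
      rw [← pv_run_small]; simp
    have el : (5 ≤ pvBestRun [false, dice.contains 1, dice.contains 2, dice.contains 3,
          dice.contains 4, dice.contains 5, dice.contains 6])
        ↔ ((dice.contains 1 && dice.contains 2 && dice.contains 3 && dice.contains 4 && dice.contains 5)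
           || (dice.contains 2 && dice.contains 3 && dice.contains 4 && dice.contains 5 && dice.contains 6)) = true := by
      rw [← pv_run_large]; simp
    simp only [hp2, pvStats, hstats, List.getD_cons_succ, List.getD_cons_zero,
      zero_add, e3, e4, es, el, Bool.false_or, Nat.one_lt_cast]
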